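-- pv_equiv track=rewrite | github.com/1stijn/Site-Builder | data/keywords.py | get_page_from_keywords
-- ===== SOURCE A (Python) =====
-- from collections import defaultdict
--
-- def get_page_from_keywords(keywords_list, query):
--     query = query.lower()
--
--     page_scores = defaultdict(int)
--
--     for page, keywords in keywords_list.items():
--         for keyword in keywords:
--             page_scores[page] += query.count(keyword)
--
--     if page_scores:
--         best_page = max(page_scores, key=page_scores.get)
--         return best_page
--     return 'No matching page found'
-- ===== SOURCE B (Python) =====
-- def get_page_from_keywords(keywords_list, query):
--     query = query.lower()
--     scored = [(-sum(query.count(kw) for kw in kws), page)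
--               for page, kws in keywords_list.items() if kws]
--     if not scored:
--         return 'No matching page found'
--     scored.sort(key=lambda t: t[0])
--     return scored[0][1]
-- ===== Notes on version B (the rewrite author's own statement) =====
-- stated objective: alternative
-- what changed: Replaced the defaultdict score table plus max(..., key=...) argmax by sort-based selection: build a list of (-score, page) pairs for pages with keywords, stable-sort it by the negated score and return the first page; stability preserves the first-insertion tie-break and the empty list gives the sentinel.
import Mathlib
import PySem

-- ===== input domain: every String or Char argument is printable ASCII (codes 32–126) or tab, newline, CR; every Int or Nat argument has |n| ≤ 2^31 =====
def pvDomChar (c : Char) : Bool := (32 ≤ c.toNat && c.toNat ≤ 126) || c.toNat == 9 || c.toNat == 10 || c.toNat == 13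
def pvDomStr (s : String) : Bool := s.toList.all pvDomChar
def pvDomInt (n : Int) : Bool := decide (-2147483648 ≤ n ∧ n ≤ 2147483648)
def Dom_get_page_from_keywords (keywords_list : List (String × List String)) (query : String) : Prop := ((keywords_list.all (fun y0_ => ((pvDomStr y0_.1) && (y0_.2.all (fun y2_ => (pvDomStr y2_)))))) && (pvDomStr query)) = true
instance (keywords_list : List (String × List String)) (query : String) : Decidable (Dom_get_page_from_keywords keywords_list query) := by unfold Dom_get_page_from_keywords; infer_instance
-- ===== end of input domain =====

-- B replaces A's defaultdict score table + max(..., key=...) argmax by sort-based selection: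
-- it builds (-score, page) pairs and stable-sorts them, taking the first (objective: alternative).
-- Equivalence is about the return value; neither version mutates its input.

-- ===== PORT A =====
def get_page_from_keywords (keywords_list : List (String × List String)) (query : String) : String :=
  let q := PySem.Str.lower query
  let page_scores : PySem.Dict String Int :=
    keywords_list.foldl
      (fun d p =>
        p.2.foldl (fun d keyword => d.modify p.1 0 (fun v => v + (PySem.Str.count q keyword : Int))) d)
      PySem.Dict.empty
  match PySem.List.max? page_scores.keys (fun k => page_scores.getD k 0) with
  | some best_page => best_page
  | none => "No matching page found"

-- ===== PORT B =====
def get_page_from_keywords_alt (keywords_list : List (String × List String)) (query : String) : String :=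
  let q := PySem.Str.lower query
  let scored : List (Int × String) :=
    (keywords_list.filter (fun p => !p.2.isEmpty)).map
      (fun p => (-(p.2.foldl (fun s kw => s + (PySem.Str.count q kw : Int)) 0), p.1))
  match PySem.List.sorted scored (fun t => t.1) with
  | [] => "No matching page found"
  | t :: _ => t.2

-- ===== PRECONDITION & SPEC =====
-- Pre_ requires the page names (dict keys) to be pairwise distinct — exactly what a Python dict
-- guarantees; a duplicate-key association list cannot arise from A's dict parameter.
def Pre_get_page_from_keywords (keywords_list : List (String × List String)) (query : String) : Prop :=
  (keywords_list.map Prod.fst).Nodup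
instance (keywords_list : List (String × List String)) (query : String) : Decidable (Pre_get_page_from_keywords keywords_list query) := by unfold Pre_get_page_from_keywords; infer_instance

def pvWitness_get_page_from_keywords : (List (String × List String)) × String :=
  ([("home", ["welcome"]), ("about", ["us"])], "welcome home")

def Spec_get_page_from_keywords (keywords_list : List (String × List String)) (query : String) (out : String) : Prop := out = get_page_from_keywords_alt keywords_list query
instance (keywords_list : List (String × List String)) (query : String) (out : String) : Decidable (Spec_get_page_from_keywords keywords_list query out) := by unfold Spec_get_page_from_keywords; infer_instance

-- ===== CLAIM (what is proved, stated in full; the proofs are below) =====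
def Claim_equal_get_page_from_keywords : Prop := ∀ (keywords_list : List (String × List String)) (query : String), Dom_get_page_from_keywords keywords_list query → Pre_get_page_from_keywords keywords_list query → Spec_get_page_from_keywords keywords_list query (get_page_from_keywords keywords_list query)

-- ===== LEMMAS AND PROOFS =====

-- contains / keys of a fresh insert
theorem pv_contains_insert (d : PySem.Dict String Int) (k k' : String) (v : Int) :
    (d.insert k v).contains k' = (k' == k || d.contains k') :=
  PySem.Dict.contains_modify d k k' v (fun _ => v)

theorem pv_keys_insert_fresh (d : PySem.Dict String Int) (k : String) (v : Int)
    (h : d.contains k = false) : (d.insert k v).keys = d.keys ++ [k] := by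
  simp [PySem.Dict.insert, h, PySem.Dict.keys]

-- A's inner loop over one page's keywords collapses to a single insert of the page's total score.
theorem pv_inner_eq (c : String → Int) (k : String) :
    ∀ (kws : List String) (d : PySem.Dict String Int), kws ≠ [] →
      kws.foldl (fun d kw => d.modify k 0 (fun v => v + c kw)) d
        = d.insert k (d.getD k 0 + (kws.map c).sum) := by
  intro kws
  induction kws with
  | nil => intro d h; exact absurd rfl h
  | cons kw rest ih =>
    intro d _
    cases rest with
    | nil => simp [PySem.Dict.modify]
    | cons a b =>
      have h1 : List.foldl (fun d kw => d.modify k 0 fun v => v + c kw) d (kw :: a :: b)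
          = List.foldl (fun d kw => d.modify k 0 fun v => v + c kw)
              (d.modify k 0 fun v => v + c kw) (a :: b) := rfl
      rw [h1, ih (d.modify k 0 fun v => v + c kw) (by simp), PySem.Dict.getD_modify_self]
      show (d.insert k (d.getD k 0 + c kw)).insert k
            ((fun v => v + c kw) (d.getD k 0) + (List.map c (a :: b)).sum)
          = d.insert k (d.getD k 0 + (List.map c (kw :: a :: b)).sum)
      rw [PySem.Dict.insert_insert_self]
      simp [add_assoc]

-- Characterisation of A's score table: keys are the pages with a nonempty keyword list, in order,
-- and each such page maps to its total score (distinct page names, fresh w.r.t. the accumulator).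
theorem pv_dict_char (c : String → Int) :
    ∀ (kl : List (String × List String)) (d : PySem.Dict String Int),
      (kl.map Prod.fst).Nodup → (∀ p ∈ kl, d.contains p.1 = false) →
      ((kl.foldl (fun d p => p.2.foldl (fun d kw => d.modify p.1 0 (fun v => v + c kw)) d) d).keys
          = d.keys ++ (kl.filter (fun p => !p.2.isEmpty)).map Prod.fst)
      ∧ (∀ k : String, k ∉ kl.map Prod.fst →
          (kl.foldl (fun d p => p.2.foldl (fun d kw => d.modify p.1 0 (fun v => v + c kw)) d) d).getD k 0
            = d.getD k 0)
      ∧ (∀ p ∈ kl, p.2 ≠ [] →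
          (kl.foldl (fun d p => p.2.foldl (fun d kw => d.modify p.1 0 (fun v => v + c kw)) d) d).getD p.1 0
            = (p.2.map c).sum) := by
  intro kl
  induction kl with
  | nil => intro d _ _; refine ⟨by simp, by intro k _; rfl, by intro p hp; cases hp⟩
  | cons hd tl ih =>
    intro d hnd hfresh
    have hnd' : (tl.map Prod.fst).Nodup := (List.nodup_cons.mp hnd).2
    have hhd_notin : hd.1 ∉ tl.map Prod.fst := (List.nodup_cons.mp hnd).1
    have hd_fresh : d.contains hd.1 = false := hfresh hd (List.mem_cons_self ..)
    by_cases he : hd.2 = []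
    · -- page with no keywords: the accumulator is unchanged
      have ihh := ih d hnd' (fun p hp => hfresh p (List.mem_cons_of_mem _ hp))
      refine ⟨?_, ?_, ?_⟩
      · simp only [List.foldl_cons, he, List.foldl_nil]
        rw [ihh.1]
        simp [he]
      · intro k hk
        simp only [List.map_cons, List.mem_cons, not_or] at hk
        simp only [List.foldl_cons, he, List.foldl_nil]
        exact ihh.2.1 k hk.2
      · intro p hp hpne
        rcases List.mem_cons.mp hp with rfl | hp'
        · exact absurd he hpne
        · simp only [List.foldl_cons, he, List.foldl_nil]
          exact ihh.2.2 p hp' hpne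
    · -- page with keywords: one fresh insert of its total score
      have hstep : hd.2.foldl (fun d kw => d.modify hd.1 0 (fun v => v + c kw)) d
          = d.insert hd.1 ((hd.2.map c).sum) := by
        rw [pv_inner_eq c hd.1 hd.2 d he, PySem.Dict.getD_of_not_contains d 0 hd_fresh, zero_add]
      set d1 := d.insert hd.1 ((hd.2.map c).sum) with hd1
      have hfe : (!hd.2.isEmpty) = true := by cases hcase : hd.2 <;> simp_all
      have hfresh1 : ∀ p ∈ tl, d1.contains p.1 = false := by
        intro p hp
        rw [hd1, pv_contains_insert]
        have hne : p.1 ≠ hd.1 := by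
          intro hpe; exact hhd_notin (hpe ▸ List.mem_map_of_mem hp)
        simp [hne, hfresh p (List.mem_cons_of_mem _ hp)]
      have ihh := ih d1 hnd' hfresh1
      refine ⟨?_, ?_, ?_⟩
      · simp only [List.foldl_cons, hstep]
        rw [ihh.1, hd1, pv_keys_insert_fresh d hd.1 _ hd_fresh]
        simp [hfe]
      · intro k hk
        simp only [List.map_cons, List.mem_cons, not_or] at hk
        simp only [List.foldl_cons, hstep]
        rw [ihh.2.1 k hk.2, hd1, PySem.Dict.getD_insert_of_ne _ _ _ hk.1]
      · intro p hp hpne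
        rcases List.mem_cons.mp hp with rfl | hp'
        · simp only [List.foldl_cons, hstep]
          rw [ihh.2.1 p.1 hhd_notin, hd1, PySem.Dict.getD_insert_self]
        · simp only [List.foldl_cons, hstep]
          exact ihh.2.2 p hp' hpne

-- head of insertBy: the new element goes in front exactly when 'before' puts it before the old head
theorem pv_head_insertBy {α : Type} (before : α → α → Bool) (x : α) (acc : List α) :
    (PySem.List.insertBy before x acc).head?
      = some (match acc.head? with
              | none => x
              | some h => if before x h then x else h) := by
  cases acc with
  | nil => rfl
  | cons y ys =>
    by_cases hb : before x y = true
    · simp [PySem.List.insertBy, hb]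
    · simp [PySem.List.insertBy, hb]

-- the head of the stable insertion sort evolves like a running strict-< minimum fold
theorem pv_sorted_head {α κ : Type} [LT κ] [DecidableLT κ] (xs : List α) (key : α → κ) :
    (PySem.List.sorted xs key).head?
      = xs.foldl
          (fun (h : Option α) x =>
            match h with
            | none => some x
            | some m => if key x < key m then some x else some m)
          none := by
  show (xs.foldl (fun acc x => PySem.List.insertBy (fun a b => decide (key a < key b)) x acc) []).head? = _
  have haux : ∀ (l : List α) (acc : List α),
      (l.foldl (fun acc x => PySem.List.insertBy (fun a b => decide (key a < key b)) x acc) acc).head?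
        = l.foldl
            (fun (h : Option α) x =>
              match h with
              | none => some x
              | some m => if key x < key m then some x else some m)
            acc.head? := by
    intro l
    induction l with
    | nil => intro acc; rfl
    | cons x rest ih =>
      intro acc
      simp only [List.foldl_cons]
      rw [ih, pv_head_insertBy]
      cases hh : acc.head? with
      | none => rfl
      | some h => by_cases hb : key x < key h <;> simp [hb]
  exact haux xs []

-- Invariant linking max?'s running best key with the running head of B's sorted pair list.
theorem pv_rel (g : String → Int) (sc : String × List String → Int) :
    ∀ (cs : List (String × List String)) (s : Option String) (t : Option (Int × String)),
      (∀ p ∈ cs, g p.1 = sc p) →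
      ((s = none ∧ t = none) ∨ (∃ m, s = some m ∧ t = some (-(g m), m))) →
      (let s' := cs.foldl (fun acc p => match acc with
          | none => some p.1
          | some m => if g m < g p.1 then some p.1 else some m) s
       let t' := cs.foldl
          (fun (h : Option (Int × String)) p =>
            match h with
            | none => some (-(sc p), p.1)
            | some m => if -(sc p) < m.1 then some (-(sc p), p.1) else some m)
          t
       (s' = none ∧ t' = none) ∨ (∃ m, s' = some m ∧ t' = some (-(g m), m))) := by
  intro cs
  induction cs with
  | nil => intro s t _ hR; exact hR
  | cons p rest ih =>
    intro s t hall hR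
    have hp : g p.1 = sc p := hall p (List.mem_cons_self ..)
    have hrest : ∀ q ∈ rest, g q.1 = sc q := fun q hq => hall q (List.mem_cons_of_mem _ hq)
    simp only [List.foldl_cons]
    apply ih _ _ hrest
    rcases hR with ⟨hs, ht⟩ | ⟨m, hs, ht⟩
    · subst hs; subst ht
      exact Or.inr ⟨p.1, rfl, by rw [hp]⟩
    · subst hs; subst ht
      by_cases hlt : g m < g p.1
      · have hlt' : -(sc p) < -(g m) := by rw [← hp]; omega
        refine Or.inr ⟨p.1, ?_, ?_⟩
        · simp [hlt]
        · simp [hlt', hp]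
      · have hlt' : ¬ (-(sc p) < -(g m)) := by rw [← hp]; omega
        refine Or.inr ⟨m, ?_, ?_⟩
        · simp [hlt]
        · simp [hlt']

theorem pv_main (kl : List (String × List String)) (q : String)
    (hnd : (kl.map Prod.fst).Nodup) :
    get_page_from_keywords kl q = get_page_from_keywords_alt kl q := by
  set c : String → Int := fun kw => (PySem.Str.count (PySem.Str.lower q) kw : Int) with hc
  set D := kl.foldl (fun d p => p.2.foldl (fun d kw => d.modify p.1 0 (fun v => v + c kw)) d)
      PySem.Dict.empty with hD
  set cs := kl.filter (fun p => !p.2.isEmpty) with hcs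
  set g : String → Int := fun k => D.getD k 0 with hg
  set sc : String × List String → Int := fun p => (p.2.map c).sum with hsc
  have hgoalA : get_page_from_keywords kl q =
      (match PySem.List.max? D.keys g with
        | some best_page => best_page
        | none => "No matching page found") := rfl
  have hgoalB : get_page_from_keywords_alt kl q =
      (match PySem.List.sorted
          (cs.map (fun p => (-(p.2.foldl (fun s kw => s + c kw) 0), p.1)))
          (fun t : Int × String => t.1) with
        | [] => "No matching page found"
        | t :: _ => t.2) := rfl
  have hchar := pv_dict_char c kl PySem.Dict.empty hnd
      (by intro p _; exact PySem.Dict.contains_empty p.1)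
  have hkeys : D.keys = cs.map Prod.fst := by
    rw [hD, hchar.1]; simp [hcs]
  have hall : ∀ p ∈ cs, g p.1 = sc p := by
    intro p hp
    rw [hcs, List.mem_filter] at hp
    rw [hg, hsc, hD]
    exact hchar.2.2 p hp.1 (by simpa using hp.2)
  -- B's inner per-page sum fold is the mapped sum
  have hsum : (fun p : String × List String => (-(p.2.foldl (fun s kw => s + c kw) 0), p.1))
      = fun p => (-(sc p), p.1) := by
    funext p
    rw [hsc]
    simp only [PySem.List.foldl_add, zero_add]
  -- A's max? over the key list is a fold over cs
  have hA : PySem.List.max? (cs.map Prod.fst) g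
      = cs.foldl (fun acc p => match acc with
          | none => some p.1
          | some m => if g m < g p.1 then some p.1 else some m) none := by
    rw [PySem.List.max?, List.foldl_map]
    apply List.foldl_ext
    intro acc p _
    cases acc with
    | none => rfl
    | some m => rfl
  -- B's sorted head is a fold over cs
  have hB : (PySem.List.sorted (cs.map (fun p => (-(sc p), p.1))) (fun t : Int × String => t.1)).head?
      = cs.foldl
          (fun (h : Option (Int × String)) p =>
            match h with
            | none => some (-(sc p), p.1)
            | some m => if -(sc p) < m.1 then some (-(sc p), p.1) else some m)
          none := by
    rw [pv_sorted_head, List.foldl_map]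
    apply List.foldl_ext
    intro acc p _
    cases acc with
    | none => rfl
    | some m => rfl
  have hrel := pv_rel g sc cs none none hall (Or.inl ⟨rfl, rfl⟩)
  simp only at hrel
  rw [hgoalA, hgoalB, hkeys, hA, hsum]
  rcases hrel with ⟨hs, ht⟩ | ⟨m, hs, ht⟩
  · rw [hs]
    have : (PySem.List.sorted (cs.map (fun p => (-(sc p), p.1))) (fun t : Int × String => t.1)).head? = none := by
      rw [hB, ht]
    rw [List.head?_eq_none_iff] at this
    rw [this]
  · rw [hs]
    have hhd : (PySem.List.sorted (cs.map (fun p => (-(sc p), p.1))) (fun t : Int × String => t.1)).head? = some (-(g m), m) := by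
      rw [hB, ht]
    cases hsort : PySem.List.sorted (cs.map (fun p => (-(sc p), p.1))) (fun t : Int × String => t.1) with
    | nil => rw [hsort] at hhd; cases hhd
    | cons u tail =>
      rw [hsort] at hhd
      simp only [List.head?_cons, Option.some.injEq] at hhd
      subst hhd
      rfl

-- ===== VERDICT (by name: the statement is the Claim_ definition above) =====
theorem get_page_from_keywords_spec : Claim_equal_get_page_from_keywords := by
  intro kl q _ hpre
  unfold Spec_get_page_from_keywords
  exact pv_main kl q hpre
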